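-- pv_equiv track=rewrite | github.com/TrueBurn/advent-of-code | 2024/day-14/solution.py | find_christmas_tree
-- ===== SOURCE A (Python) =====
-- from typing import List, Tuple, Set
--
-- def find_christmas_tree(positions: List[Tuple[int, int]], width: int, height: int) -> bool:
--     grid = [['.'] * width for _ in range(height)]
--     for x, y in positions:
--         grid[y][x] = '#'
--
--     for center_y in range(10, height-20):
--         for center_x in range(10, width-20):
--             if grid[center_y][center_x] != '#':
--                 continue
--
--             tree_found = True
--             tree_height = 11
--
--             for y_offset in range(tree_height):
--                 y = center_y + y_offset
--                 if y >= height: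
--                     tree_found = False
--                     break
--
--                 width_at_row = min(1 + y_offset * 2, 11)
--                 start_x = center_x - width_at_row//2
--                 end_x = center_x + width_at_row//2 + 1
--
--                 for x in range(start_x, end_x):
--                     if x < 0 or x >= width or grid[y][x] != '#':
--                         tree_found = False
--                         break
--
--                 if not tree_found:
--                     break
--
--             if tree_found:
--                 return True
--
--     return False
-- ===== SOURCE B (Python) =====
-- def find_christmas_tree(positions, width, height):
--     # Mark the robots on a boolean grid once, then try only robot cells as
--     # tree tops (reduced onto the wrapping grid), checking each triangle row
--     # by grid lookups instead of scanning the whole search window.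
--     occ = [[False] * width for _ in range(height)]
--     for x, y in positions:
--         occ[y][x] = True
--     for x, y in positions:
--         cx, cy = x % width, y % height
--         if 10 <= cx < width - 20 and 10 <= cy < height - 20:
--             if all(occ[cy + dy][cx + dx]
--                    for dy in range(11)
--                    for dx in range(-min(dy, 5), min(dy, 5) + 1)):
--                 return True
--     return False
-- ===== Notes on version B (the rewrite author's own statement) =====
-- stated objective: alternative
-- what changed: Instead of scanning every cell of the (width-30)x(height-30) search window as a candidate tree top, B marks the robots on a boolean grid once and then tries only the robot positions themselves (reduced onto the wrapping grid) as tops, verifying the triangle by grid lookups; Pre_ excludes only inputs on which A raises IndexError (a degenerate grid with positions present, or a coordinate outside valid index range).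
import Mathlib
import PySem

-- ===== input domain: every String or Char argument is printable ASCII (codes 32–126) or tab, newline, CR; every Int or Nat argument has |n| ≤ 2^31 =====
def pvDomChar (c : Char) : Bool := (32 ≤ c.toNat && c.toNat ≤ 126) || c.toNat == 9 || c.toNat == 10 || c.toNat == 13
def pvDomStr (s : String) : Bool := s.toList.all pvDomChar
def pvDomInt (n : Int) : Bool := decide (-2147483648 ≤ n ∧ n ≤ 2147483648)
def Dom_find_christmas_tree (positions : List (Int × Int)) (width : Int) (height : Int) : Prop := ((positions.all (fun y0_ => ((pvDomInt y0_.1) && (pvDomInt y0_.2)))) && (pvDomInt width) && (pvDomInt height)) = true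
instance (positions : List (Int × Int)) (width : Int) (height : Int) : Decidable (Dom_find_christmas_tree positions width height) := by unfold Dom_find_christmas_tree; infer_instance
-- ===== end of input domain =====

-- B replaces A's scan of every cell of the search window by a pass over the robot
-- positions themselves as candidate tree tops, checking each triangle by
-- boolean-grid lookups (objective: alternative).

-- ===== PORT A =====
-- grid[y][x] = '#'  (Python list assignment; an in-range negative index wraps)
def fctMark (grid : List (List Char)) (p : Int × Int) : List (List Char) :=
  PySem.List.pySetD grid p.2 (PySem.List.pySetD (PySem.List.pyGetD grid p.2 []) p.1 '#')

-- grid[y][x] read (A only reads indices it has bounds-checked, so defaults are unreachable)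
def fctCell (grid : List (List Char)) (y x : Int) : Char :=
  PySem.List.pyGetD (PySem.List.pyGetD grid y []) x '.'

-- body of 'for y_offset in range(tree_height)': true = this row of the tree is complete
def fctRowOK (grid : List (List Char)) (width height cy cx dy : Int) : Bool :=
  let y := cy + dy
  if height ≤ y then false
  else
    let width_at_row := min (1 + dy * 2) 11
    let start_x := cx - PySem.Int.floordiv width_at_row 2
    let end_x := cx + PySem.Int.floordiv width_at_row 2 + 1
    (PySem.List.pyRange start_x end_x).all (fun x =>
      !(decide (x < 0) || decide (width ≤ x)) && (fctCell grid y x == '#'))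

-- body of the two center loops ('continue' when the center is unmarked, then tree_found)
def fctCenterOK (grid : List (List Char)) (width height cy cx : Int) : Bool :=
  if fctCell grid cy cx ≠ '#' then false
  else (PySem.List.pyRange 0 11).all (fun dy => fctRowOK grid width height cy cx dy)

def find_christmas_tree (positions : List (Int × Int)) (width : Int) (height : Int) : Bool :=
  let grid := positions.foldl fctMark
    ((PySem.List.pyRange 0 height).map (fun _ => List.replicate width.toNat '.'))
  (PySem.List.pyRange 10 (height - 20)).any (fun cy =>
    (PySem.List.pyRange 10 (width - 20)).any (fun cx =>
      fctCenterOK grid width height cy cx))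

-- ===== PORT B =====
-- occ[y][x] = True  (Python list assignment; an in-range negative index wraps)
def fctMarkB (grid : List (List Bool)) (p : Int × Int) : List (List Bool) :=
  PySem.List.pySetD grid p.2 (PySem.List.pySetD (PySem.List.pyGetD grid p.2 []) p.1 true)

-- occ[y][x] read (B only reads cells its bounds guard has checked, so defaults are unreachable)
def fctCellB (grid : List (List Bool)) (y x : Int) : Bool :=
  PySem.List.pyGetD (PySem.List.pyGetD grid y []) x false

-- the 'all(...)' generator: every triangle cell under top (cx, cy) is occupied
def fctTriangleOK (occ : List (List Bool)) (cx cy : Int) : Bool :=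
  (PySem.List.pyRange 0 11).all (fun dy =>
    (PySem.List.pyRange (-(min dy 5)) (min dy 5 + 1)).all (fun dx =>
      fctCellB occ (cy + dy) (cx + dx)))

def find_christmas_tree_alt (positions : List (Int × Int)) (width : Int) (height : Int) : Bool :=
  let occ := positions.foldl fctMarkB
    ((PySem.List.pyRange 0 height).map (fun _ => List.replicate width.toNat false))
  positions.any (fun p =>
    let cx := PySem.Int.mod p.1 width
    let cy := PySem.Int.mod p.2 height
    (decide (10 ≤ cx) && decide (cx < width - 20) &&
     decide (10 ≤ cy) && decide (cy < height - 20)) &&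
    fctTriangleOK occ cx cy)

-- ===== PRECONDITION & SPEC =====
-- Exactly the inputs on which A returns: with any position present the grid must be
-- non-degenerate and every coordinate a valid (possibly negative, wrapping) Python
-- index; on all other inputs A raises IndexError.
def Pre_find_christmas_tree (positions : List (Int × Int)) (width : Int) (height : Int) : Prop :=
  (positions = [] ∨ (0 < width ∧ 0 < height)) ∧
  ∀ p ∈ positions, -width ≤ p.1 ∧ p.1 < width ∧ -height ≤ p.2 ∧ p.2 < height
instance (positions : List (Int × Int)) (width : Int) (height : Int) : Decidable (Pre_find_christmas_tree positions width height) := by unfold Pre_find_christmas_tree; infer_instance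

def pvWitness_find_christmas_tree : (List (Int × Int)) × Int × Int := ([(0, 0), (12, -3)], 40, 40)

def Spec_find_christmas_tree (positions : List (Int × Int)) (width : Int) (height : Int) (out : Bool) : Prop := out = find_christmas_tree_alt positions width height
instance (positions : List (Int × Int)) (width : Int) (height : Int) (out : Bool) : Decidable (Spec_find_christmas_tree positions width height out) := by unfold Spec_find_christmas_tree; infer_instance

-- ===== CLAIM (what is proved, stated in full; the proofs are below) =====
def Claim_equal_find_christmas_tree : Prop := ∀ (positions : List (Int × Int)) (width : Int) (height : Int), Dom_find_christmas_tree positions width height → Pre_find_christmas_tree positions width height → Spec_find_christmas_tree positions width height (find_christmas_tree positions width height)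

-- ===== LEMMAS AND PROOFS =====

-- "some robot occupies wrapped cell (x, y)" — the content both programs decide
def fctOcc (positions : List (Int × Int)) (width height x y : Int) : Prop :=
  ∃ p ∈ positions, PySem.Int.mod p.1 width = x ∧ PySem.Int.mod p.2 height = y

-- "all cells of the tree triangle centered at (cx, cy) are occupied"
def fctTriProp (positions : List (Int × Int)) (width height cx cy : Int) : Prop :=
  ∀ dy, 0 ≤ dy → dy < 11 → ∀ dx, -(min dy 5) ≤ dx → dx < min dy 5 + 1 →
    fctOcc positions width height (cx + dx) (cy + dy)

theorem fct_pyIdx_wrap (n : Nat) (i : Int) (h0 : 0 < (n : Int)) (h1 : -(n : Int) ≤ i) (h2 : i < (n : Int)) :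
    PySem.List.pyIdx? n i = some (PySem.Int.mod i n).toNat := by
  rw [PySem.Int.mod_eq_emod_of_pos h0]
  unfold PySem.List.pyIdx?
  rcases le_or_gt 0 i with h | h
  · rw [if_pos h, if_pos h2, Int.emod_eq_of_lt h h2]
  · rw [if_neg (by omega), if_pos h1]
    have : i % (n : Int) = i + n := by
      rw [← Int.add_emod_right]
      exact Int.emod_eq_of_lt (by omega) (by omega)
    rw [this]
    congr 1
    omega

theorem fct_halfw (dy : Int) (h : 0 ≤ dy) :
    PySem.Int.floordiv (min (1 + dy * 2) 11) 2 = min dy 5 := by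
  rcases le_or_gt dy 4 with h5 | h5
  · rw [show min (1 + dy * 2) 11 = 1 + dy * 2 by omega, show min dy 5 = dy by omega,
      PySem.Int.floordiv_eq_iff_of_pos (by omega)]
    omega
  · rw [show min (1 + dy * 2) 11 = 11 by omega, show min dy 5 = 5 by omega]
    decide

theorem fct_pyGetD_default_or_mem {α : Type} (xs : List α) (i : Int) (d : α) :
    PySem.List.pyGetD xs i d = d ∨ PySem.List.pyGetD xs i d ∈ xs := by
  by_cases h : PySem.Raise.InRange xs.length i
  · exact Or.inr (PySem.List.pyGetD_mem xs d h)
  · exact Or.inl (PySem.List.pyGetD_of_none xs i d ((PySem.List.pyGet?_eq_none_iff xs i).mpr h))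

-- every cell of the fresh grid is '.'
theorem fct_cell_grid0 (width height y x : Int) :
    fctCell ((PySem.List.pyRange 0 height).map (fun _ => List.replicate width.toNat '.')) y x = '.' := by
  unfold fctCell
  rcases fct_pyGetD_default_or_mem ((PySem.List.pyRange 0 height).map (fun _ => List.replicate width.toNat '.')) y [] with h | h
  · rw [h]
    rcases fct_pyGetD_default_or_mem ([] : List Char) x '.' with h2 | h2
    · exact h2
    · simp at h2
  · rcases List.mem_map.mp h with ⟨_, _, he⟩
    rw [← he]
    rcases fct_pyGetD_default_or_mem (List.replicate width.toNat '.') x '.' with h2 | h2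
    · exact h2
    · exact List.eq_of_mem_replicate h2

-- fctMark rewrites exactly one (wrapped) cell
theorem fct_mark_eq (g : List (List Char)) (width height : Int) (p : Int × Int)
    (hw : 0 < width) (hh : 0 < height)
    (hlen : (g.length : Int) = height) (hrow : ∀ r ∈ g, (r.length : Int) = width)
    (hp : -width ≤ p.1 ∧ p.1 < width ∧ -height ≤ p.2 ∧ p.2 < height) :
    fctMark g p = g.set (PySem.Int.mod p.2 height).toNat
      ((g.getD (PySem.Int.mod p.2 height).toNat []).set (PySem.Int.mod p.1 width).toNat '#') := by
  obtain ⟨h1, h2, h3, h4⟩ := hp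
  have hyidx : PySem.List.pyIdx? g.length p.2 = some (PySem.Int.mod p.2 height).toNat := by
    rw [hlen.symm] at hh h3 h4 ⊢
    rw [fct_pyIdx_wrap g.length p.2 hh h3 h4, hlen]
  have hylt : (PySem.Int.mod p.2 height).toNat < g.length := by
    have := PySem.Int.mod_lt (a := p.2) hh
    have := PySem.Int.mod_nonneg (a := p.2) hh
    omega
  have hrowget : PySem.List.pyGetD g p.2 [] = g.getD (PySem.Int.mod p.2 height).toNat [] := by
    simp [PySem.List.pyGetD, PySem.List.pyGet?, hyidx, List.getElem?_eq_getElem hylt]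
  have hrlen : ((g.getD (PySem.Int.mod p.2 height).toNat []).length : Int) = width := by
    rw [List.getD_eq_getElem _ _ hylt]; exact hrow _ (List.getElem_mem hylt)
  have hxidx : PySem.List.pyIdx? (g.getD (PySem.Int.mod p.2 height).toNat []).length p.1
      = some (PySem.Int.mod p.1 width).toNat := by
    rw [hrlen.symm] at hw h1 h2 ⊢
    rw [fct_pyIdx_wrap _ p.1 hw h1 h2, hrlen]
  unfold fctMark
  rw [hrowget]
  simp [PySem.List.pySetD, PySem.List.pySet?, hyidx, -List.getD_eq_getElem?_getD, hxidx]

theorem fct_cell_eq (g : List (List Char)) (height width y x : Int)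
    (hlen : (g.length : Int) = height) (hrow : ∀ r ∈ g, (r.length : Int) = width)
    (hy0 : 0 ≤ y) (hy1 : y < height) (hx0 : 0 ≤ x) (hx1 : x < width) :
    fctCell g y x = (g.getD y.toNat []).getD x.toNat '.' := by
  have hylt : y.toNat < g.length := by omega
  have hrl : ((g.getD y.toNat []).length : Int) = width := by
    rw [List.getD_eq_getElem _ _ hylt]; exact hrow _ (List.getElem_mem hylt)
  unfold fctCell
  rw [PySem.List.pyGetD_eq_getElem g [] hy0 (by omega),
      show g[y.toNat] = g.getD y.toNat [] from (List.getD_eq_getElem _ _ hylt).symm,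
      PySem.List.pyGetD_eq_getElem _ '.' hx0 (by omega)]
  exact (List.getD_eq_getElem _ _ (by omega)).symm

theorem fct_step_char (width height : Int) (hw : 0 < width) (hh : 0 < height)
    (g : List (List Char)) (p : Int × Int)
    (hlen : (g.length : Int) = height) (hrow : ∀ r ∈ g, (r.length : Int) = width)
    (hpw : -width ≤ p.1 ∧ p.1 < width ∧ -height ≤ p.2 ∧ p.2 < height)
    (x y : Int) (hx0 : 0 ≤ x) (hx1 : x < width) (hy0 : 0 ≤ y) (hy1 : y < height) :
    fctCell (fctMark g p) y x = '#' ↔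
      ((PySem.Int.mod p.1 width = x ∧ PySem.Int.mod p.2 height = y) ∨ fctCell g y x = '#') := by
  have hmark := fct_mark_eq g width height p hw hh hlen hrow hpw
  have hylt : (PySem.Int.mod p.2 height).toNat < g.length := by
    have := PySem.Int.mod_lt (a := p.2) hh
    have := PySem.Int.mod_nonneg (a := p.2) hh
    omega
  have hrl : ((g.getD (PySem.Int.mod p.2 height).toNat []).length : Int) = width := by
    rw [List.getD_eq_getElem _ _ hylt]; exact hrow _ (List.getElem_mem hylt)
  have hlen' : ((fctMark g p).length : Int) = height := by rw [hmark]; simpa using hlen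
  have hrow' : ∀ r ∈ fctMark g p, (r.length : Int) = width := by
    rw [hmark]; intro r hr
    rcases List.mem_or_eq_of_mem_set hr with h | h
    · exact hrow r h
    · rw [h]; simpa using hrl
  have hmy0 := PySem.Int.mod_nonneg (a := p.2) hh
  have hmy1 := PySem.Int.mod_lt (a := p.2) hh
  have hmx0 := PySem.Int.mod_nonneg (a := p.1) hw
  have hmx1 := PySem.Int.mod_lt (a := p.1) hw
  rw [fct_cell_eq (fctMark g p) height width y x hlen' hrow' hy0 hy1 hx0 hx1,
      fct_cell_eq g height width y x hlen hrow hy0 hy1 hx0 hx1, hmark]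
  have hyltN : y.toNat < g.length := by omega
  by_cases hy : PySem.Int.mod p.2 height = y
  · have hyt : y.toNat = (PySem.Int.mod p.2 height).toNat := by omega
    have hsetrow : (g.set (PySem.Int.mod p.2 height).toNat
        ((g.getD (PySem.Int.mod p.2 height).toNat []).set (PySem.Int.mod p.1 width).toNat '#')).getD y.toNat []
        = (g.getD (PySem.Int.mod p.2 height).toNat []).set (PySem.Int.mod p.1 width).toNat '#' := by
      rw [List.getD_eq_getElem?_getD, List.getElem?_set, if_pos (by omega), if_pos hylt]
      rfl
    rw [hsetrow]
    have hxltN : x.toNat < (g.getD (PySem.Int.mod p.2 height).toNat []).length := by omega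
    by_cases hx : PySem.Int.mod p.1 width = x
    · rw [List.getD_eq_getElem?_getD, List.getElem?_set, if_pos (by omega), if_pos (by omega)]
      simp [hx, hy]
    · rw [List.getD_eq_getElem?_getD, List.getElem?_set, if_neg (by omega),
        ← List.getD_eq_getElem?_getD]
      have hgy : g.getD (PySem.Int.mod p.2 height).toNat [] = g.getD y.toNat [] := by rw [hyt]
      rw [hgy]
      simp [hx]
  · rw [show (g.set (PySem.Int.mod p.2 height).toNat
        ((g.getD (PySem.Int.mod p.2 height).toNat []).set (PySem.Int.mod p.1 width).toNat '#')).getD y.toNat []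
          = g.getD y.toNat [] by
      rw [List.getD_eq_getElem?_getD, List.getElem?_set, if_neg (by omega),
        ← List.getD_eq_getElem?_getD]]
    simp [hy]

theorem fct_fold_char (width height : Int) (hw : 0 < width) (hh : 0 < height) :
    ∀ (ps : List (Int × Int)) (g : List (List Char)),
      (g.length : Int) = height → (∀ r ∈ g, (r.length : Int) = width) →
      (∀ p ∈ ps, -width ≤ p.1 ∧ p.1 < width ∧ -height ≤ p.2 ∧ p.2 < height) →
      ∀ x y, 0 ≤ x → x < width → 0 ≤ y → y < height →
      (fctCell (ps.foldl fctMark g) y x = '#' ↔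
        (fctOcc ps width height x y ∨ fctCell g y x = '#')) := by
  intro ps
  induction ps with
  | nil => intro g _ _ _ x y _ _ _ _; simp [fctOcc]
  | cons p ps ih =>
    intro g hlen hrow hwr x y hx0 hx1 hy0 hy1
    have hpw := hwr p List.mem_cons_self
    have hmark := fct_mark_eq g width height p hw hh hlen hrow hpw
    have hylt : (PySem.Int.mod p.2 height).toNat < g.length := by
      have := PySem.Int.mod_lt (a := p.2) hh
      have := PySem.Int.mod_nonneg (a := p.2) hh
      omega
    have hrl : ((g.getD (PySem.Int.mod p.2 height).toNat []).length : Int) = width := by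
      rw [List.getD_eq_getElem _ _ hylt]; exact hrow _ (List.getElem_mem hylt)
    have hlen' : ((fctMark g p).length : Int) = height := by rw [hmark]; simpa using hlen
    have hrow' : ∀ r ∈ fctMark g p, (r.length : Int) = width := by
      rw [hmark]; intro r hr
      rcases List.mem_or_eq_of_mem_set hr with h | h
      · exact hrow r h
      · rw [h]; simpa using hrl
    rw [List.foldl_cons,
      ih (fctMark g p) hlen' hrow' (fun q hq => hwr q (List.mem_cons_of_mem _ hq)) x y hx0 hx1 hy0 hy1,
      fct_step_char width height hw hh g p hlen hrow hpw x y hx0 hx1 hy0 hy1]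
    simp only [fctOcc, List.mem_cons]
    constructor
    · rintro (⟨q, hq, h1, h2⟩ | (⟨h1, h2⟩ | hc))
      · exact Or.inl ⟨q, Or.inr hq, h1, h2⟩
      · exact Or.inl ⟨p, Or.inl rfl, h1, h2⟩
      · exact Or.inr hc
    · rintro (⟨q, hq | hq, h1, h2⟩ | hc)
      · exact Or.inr (Or.inl ⟨hq ▸ h1, hq ▸ h2⟩)
      · exact Or.inl ⟨q, hq, h1, h2⟩
      · exact Or.inr (Or.inr hc)

theorem fct_row_iff (grid : List (List Char)) (positions : List (Int × Int)) (width height cy cx dy : Int)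
    (hchar : ∀ x y, 0 ≤ x → x < width → 0 ≤ y → y < height →
      (fctCell grid y x = '#' ↔ fctOcc positions width height x y))
    (hcy0 : 10 ≤ cy) (hcy1 : cy < height - 20) (hcx0 : 10 ≤ cx) (hcx1 : cx < width - 20)
    (hdy0 : 0 ≤ dy) (hdy1 : dy < 11) :
    (fctRowOK grid width height cy cx dy = true ↔
      ∀ dx, -(min dy 5) ≤ dx → dx < min dy 5 + 1 →
        fctOcc positions width height (cx + dx) (cy + dy)) := by
  unfold fctRowOK
  rw [if_neg (by omega)]
  simp only [fct_halfw dy hdy0]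
  rw [List.all_eq_true]
  have hm0 : 0 ≤ min dy 5 := by omega
  have hm5 : min dy 5 ≤ 5 := by omega
  constructor
  · intro hall dx h1 h2
    have := hall (cx + dx) (PySem.List.mem_pyRange_one.mpr ⟨by omega, by omega⟩)
    simp only [Bool.and_eq_true, Bool.not_eq_true', Bool.or_eq_false_iff,
      decide_eq_false_iff_not, beq_iff_eq] at this
    exact (hchar (cx + dx) (cy + dy) (by omega) (by omega) (by omega) (by omega)).mp this.2
  · intro hp x hx
    obtain ⟨hx1, hx2⟩ := PySem.List.mem_pyRange_one.mp hx
    have hocc := hp (x - cx) (by omega) (by omega)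
    rw [show cx + (x - cx) = x by omega] at hocc
    have hc := (hchar x (cy + dy) (by omega) (by omega) (by omega) (by omega)).mpr hocc
    simp only [Bool.and_eq_true, Bool.not_eq_true', Bool.or_eq_false_iff,
      decide_eq_false_iff_not, beq_iff_eq]
    exact ⟨⟨by omega, by omega⟩, hc⟩

theorem fct_center_iff (grid : List (List Char)) (positions : List (Int × Int)) (width height cy cx : Int)
    (hchar : ∀ x y, 0 ≤ x → x < width → 0 ≤ y → y < height →
      (fctCell grid y x = '#' ↔ fctOcc positions width height x y))
    (hcy0 : 10 ≤ cy) (hcy1 : cy < height - 20) (hcx0 : 10 ≤ cx) (hcx1 : cx < width - 20) :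
    (fctCenterOK grid width height cy cx = true ↔ fctTriProp positions width height cx cy) := by
  unfold fctCenterOK
  by_cases hc : fctCell grid cy cx = '#'
  · rw [if_neg (by simp [hc]), List.all_eq_true]
    constructor
    · intro hall dy h1 h2
      exact (fct_row_iff grid positions width height cy cx dy hchar hcy0 hcy1 hcx0 hcx1 h1 h2).mp
        (hall dy (PySem.List.mem_pyRange_one.mpr ⟨h1, h2⟩))
    · intro hp dy hdy
      obtain ⟨h1, h2⟩ := PySem.List.mem_pyRange_one.mp hdy
      exact (fct_row_iff grid positions width height cy cx dy hchar hcy0 hcy1 hcx0 hcx1 h1 h2).mpr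
        (hp dy h1 h2)
  · rw [if_pos (by simp [hc])]
    simp only [Bool.false_eq_true, false_iff]
    intro hp
    have := hp 0 (by omega) (by omega) 0 (by simp) (by simp)
    rw [add_zero, add_zero] at this
    exact hc ((hchar cx cy (by omega) (by omega) (by omega) (by omega)).mpr this)

-- ===== Bool-grid lemmas (B side), mirroring the Char-grid lemmas above =====

-- every cell of the fresh boolean grid is false
theorem fct_cellB_grid0 (width height y x : Int) :
    fctCellB ((PySem.List.pyRange 0 height).map (fun _ => List.replicate width.toNat false)) y x = false := by
  unfold fctCellB
  rcases fct_pyGetD_default_or_mem ((PySem.List.pyRange 0 height).map (fun _ => List.replicate width.toNat false)) y [] with h | h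
  · rw [h]
    rcases fct_pyGetD_default_or_mem ([] : List Bool) x false with h2 | h2
    · exact h2
    · simp at h2
  · rcases List.mem_map.mp h with ⟨_, _, he⟩
    rw [← he]
    rcases fct_pyGetD_default_or_mem (List.replicate width.toNat false) x false with h2 | h2
    · exact h2
    · exact List.eq_of_mem_replicate h2

-- fctMarkB rewrites exactly one (wrapped) cell
theorem fct_markB_eq (g : List (List Bool)) (width height : Int) (p : Int × Int)
    (hw : 0 < width) (hh : 0 < height)
    (hlen : (g.length : Int) = height) (hrow : ∀ r ∈ g, (r.length : Int) = width)
    (hp : -width ≤ p.1 ∧ p.1 < width ∧ -height ≤ p.2 ∧ p.2 < height) :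
    fctMarkB g p = g.set (PySem.Int.mod p.2 height).toNat
      ((g.getD (PySem.Int.mod p.2 height).toNat []).set (PySem.Int.mod p.1 width).toNat true) := by
  obtain ⟨h1, h2, h3, h4⟩ := hp
  have hyidx : PySem.List.pyIdx? g.length p.2 = some (PySem.Int.mod p.2 height).toNat := by
    rw [hlen.symm] at hh h3 h4 ⊢
    rw [fct_pyIdx_wrap g.length p.2 hh h3 h4, hlen]
  have hylt : (PySem.Int.mod p.2 height).toNat < g.length := by
    have := PySem.Int.mod_lt (a := p.2) hh
    have := PySem.Int.mod_nonneg (a := p.2) hh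
    omega
  have hrowget : PySem.List.pyGetD g p.2 [] = g.getD (PySem.Int.mod p.2 height).toNat [] := by
    simp [PySem.List.pyGetD, PySem.List.pyGet?, hyidx, List.getElem?_eq_getElem hylt]
  have hrlen : ((g.getD (PySem.Int.mod p.2 height).toNat []).length : Int) = width := by
    rw [List.getD_eq_getElem _ _ hylt]; exact hrow _ (List.getElem_mem hylt)
  have hxidx : PySem.List.pyIdx? (g.getD (PySem.Int.mod p.2 height).toNat []).length p.1
      = some (PySem.Int.mod p.1 width).toNat := by
    rw [hrlen.symm] at hw h1 h2 ⊢
    rw [fct_pyIdx_wrap _ p.1 hw h1 h2, hrlen]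
  unfold fctMarkB
  rw [hrowget]
  simp [PySem.List.pySetD, PySem.List.pySet?, hyidx, -List.getD_eq_getElem?_getD, hxidx]

theorem fct_cellB_eq (g : List (List Bool)) (height width y x : Int)
    (hlen : (g.length : Int) = height) (hrow : ∀ r ∈ g, (r.length : Int) = width)
    (hy0 : 0 ≤ y) (hy1 : y < height) (hx0 : 0 ≤ x) (hx1 : x < width) :
    fctCellB g y x = (g.getD y.toNat []).getD x.toNat false := by
  have hylt : y.toNat < g.length := by omega
  have hrl : ((g.getD y.toNat []).length : Int) = width := by
    rw [List.getD_eq_getElem _ _ hylt]; exact hrow _ (List.getElem_mem hylt)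
  unfold fctCellB
  rw [PySem.List.pyGetD_eq_getElem g [] hy0 (by omega),
      show g[y.toNat] = g.getD y.toNat [] from (List.getD_eq_getElem _ _ hylt).symm,
      PySem.List.pyGetD_eq_getElem _ false hx0 (by omega)]
  exact (List.getD_eq_getElem _ _ (by omega)).symm

theorem fct_stepB (width height : Int) (hw : 0 < width) (hh : 0 < height)
    (g : List (List Bool)) (p : Int × Int)
    (hlen : (g.length : Int) = height) (hrow : ∀ r ∈ g, (r.length : Int) = width)
    (hpw : -width ≤ p.1 ∧ p.1 < width ∧ -height ≤ p.2 ∧ p.2 < height)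
    (x y : Int) (hx0 : 0 ≤ x) (hx1 : x < width) (hy0 : 0 ≤ y) (hy1 : y < height) :
    fctCellB (fctMarkB g p) y x = true ↔
      ((PySem.Int.mod p.1 width = x ∧ PySem.Int.mod p.2 height = y) ∨ fctCellB g y x = true) := by
  have hmark := fct_markB_eq g width height p hw hh hlen hrow hpw
  have hylt : (PySem.Int.mod p.2 height).toNat < g.length := by
    have := PySem.Int.mod_lt (a := p.2) hh
    have := PySem.Int.mod_nonneg (a := p.2) hh
    omega
  have hrl : ((g.getD (PySem.Int.mod p.2 height).toNat []).length : Int) = width := by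
    rw [List.getD_eq_getElem _ _ hylt]; exact hrow _ (List.getElem_mem hylt)
  have hlen' : ((fctMarkB g p).length : Int) = height := by rw [hmark]; simpa using hlen
  have hrow' : ∀ r ∈ fctMarkB g p, (r.length : Int) = width := by
    rw [hmark]; intro r hr
    rcases List.mem_or_eq_of_mem_set hr with h | h
    · exact hrow r h
    · rw [h]; simpa using hrl
  have hmy0 := PySem.Int.mod_nonneg (a := p.2) hh
  have hmy1 := PySem.Int.mod_lt (a := p.2) hh
  have hmx0 := PySem.Int.mod_nonneg (a := p.1) hw
  have hmx1 := PySem.Int.mod_lt (a := p.1) hw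
  rw [fct_cellB_eq (fctMarkB g p) height width y x hlen' hrow' hy0 hy1 hx0 hx1,
      fct_cellB_eq g height width y x hlen hrow hy0 hy1 hx0 hx1, hmark]
  have hyltN : y.toNat < g.length := by omega
  by_cases hy : PySem.Int.mod p.2 height = y
  · have hyt : y.toNat = (PySem.Int.mod p.2 height).toNat := by omega
    have hsetrow : (g.set (PySem.Int.mod p.2 height).toNat
        ((g.getD (PySem.Int.mod p.2 height).toNat []).set (PySem.Int.mod p.1 width).toNat true)).getD y.toNat []
        = (g.getD (PySem.Int.mod p.2 height).toNat []).set (PySem.Int.mod p.1 width).toNat true := by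
      rw [List.getD_eq_getElem?_getD, List.getElem?_set, if_pos (by omega), if_pos hylt]
      rfl
    rw [hsetrow]
    have hxltN : x.toNat < (g.getD (PySem.Int.mod p.2 height).toNat []).length := by omega
    by_cases hx : PySem.Int.mod p.1 width = x
    · rw [List.getD_eq_getElem?_getD, List.getElem?_set, if_pos (by omega), if_pos (by omega)]
      simp [hx, hy]
    · rw [List.getD_eq_getElem?_getD, List.getElem?_set, if_neg (by omega),
        ← List.getD_eq_getElem?_getD]
      have hgy : g.getD (PySem.Int.mod p.2 height).toNat [] = g.getD y.toNat [] := by rw [hyt]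
      rw [hgy]
      simp [hx]
  · rw [show (g.set (PySem.Int.mod p.2 height).toNat
        ((g.getD (PySem.Int.mod p.2 height).toNat []).set (PySem.Int.mod p.1 width).toNat true)).getD y.toNat []
          = g.getD y.toNat [] by
      rw [List.getD_eq_getElem?_getD, List.getElem?_set, if_neg (by omega),
        ← List.getD_eq_getElem?_getD]]
    simp [hy]

theorem fct_foldB (width height : Int) (hw : 0 < width) (hh : 0 < height) :
    ∀ (ps : List (Int × Int)) (g : List (List Bool)),
      (g.length : Int) = height → (∀ r ∈ g, (r.length : Int) = width) →
      (∀ p ∈ ps, -width ≤ p.1 ∧ p.1 < width ∧ -height ≤ p.2 ∧ p.2 < height) →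
      ∀ x y, 0 ≤ x → x < width → 0 ≤ y → y < height →
      (fctCellB (ps.foldl fctMarkB g) y x = true ↔
        (fctOcc ps width height x y ∨ fctCellB g y x = true)) := by
  intro ps
  induction ps with
  | nil => intro g _ _ _ x y _ _ _ _; simp [fctOcc]
  | cons p ps ih =>
    intro g hlen hrow hwr x y hx0 hx1 hy0 hy1
    have hpw := hwr p List.mem_cons_self
    have hmark := fct_markB_eq g width height p hw hh hlen hrow hpw
    have hylt : (PySem.Int.mod p.2 height).toNat < g.length := by
      have := PySem.Int.mod_lt (a := p.2) hh
      have := PySem.Int.mod_nonneg (a := p.2) hh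
      omega
    have hrl : ((g.getD (PySem.Int.mod p.2 height).toNat []).length : Int) = width := by
      rw [List.getD_eq_getElem _ _ hylt]; exact hrow _ (List.getElem_mem hylt)
    have hlen' : ((fctMarkB g p).length : Int) = height := by rw [hmark]; simpa using hlen
    have hrow' : ∀ r ∈ fctMarkB g p, (r.length : Int) = width := by
      rw [hmark]; intro r hr
      rcases List.mem_or_eq_of_mem_set hr with h | h
      · exact hrow r h
      · rw [h]; simpa using hrl
    rw [List.foldl_cons,
      ih (fctMarkB g p) hlen' hrow' (fun q hq => hwr q (List.mem_cons_of_mem _ hq)) x y hx0 hx1 hy0 hy1,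
      fct_stepB width height hw hh g p hlen hrow hpw x y hx0 hx1 hy0 hy1]
    simp only [fctOcc, List.mem_cons]
    constructor
    · rintro (⟨q, hq, h1, h2⟩ | (⟨h1, h2⟩ | hc))
      · exact Or.inl ⟨q, Or.inr hq, h1, h2⟩
      · exact Or.inl ⟨p, Or.inl rfl, h1, h2⟩
      · exact Or.inr hc
    · rintro (⟨q, hq | hq, h1, h2⟩ | hc)
      · exact Or.inr (Or.inl ⟨hq ▸ h1, hq ▸ h2⟩)
      · exact Or.inl ⟨q, hq, h1, h2⟩
      · exact Or.inr (Or.inr hc)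

-- B's triangle check reads exactly the occupancy content inside the window
theorem fct_triB_iff (occ : List (List Bool)) (positions : List (Int × Int)) (width height cx cy : Int)
    (hchar : ∀ x y, 0 ≤ x → x < width → 0 ≤ y → y < height →
      (fctCellB occ y x = true ↔ fctOcc positions width height x y))
    (hcy0 : 10 ≤ cy) (hcy1 : cy < height - 20) (hcx0 : 10 ≤ cx) (hcx1 : cx < width - 20) :
    (fctTriangleOK occ cx cy = true ↔ fctTriProp positions width height cx cy) := by
  unfold fctTriangleOK fctTriProp
  rw [List.all_eq_true]
  constructor
  · intro hall dy h1 h2 dx h3 h4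
    have hm5 : min dy 5 ≤ 5 := by omega
    have := List.all_eq_true.mp (hall dy (PySem.List.mem_pyRange_one.mpr ⟨h1, h2⟩))
      dx (PySem.List.mem_pyRange_one.mpr ⟨h3, h4⟩)
    exact (hchar (cx + dx) (cy + dy) (by omega) (by omega) (by omega) (by omega)).mp this
  · intro hp dy hdy
    obtain ⟨h1, h2⟩ := PySem.List.mem_pyRange_one.mp hdy
    rw [List.all_eq_true]
    intro dx hdx
    obtain ⟨h3, h4⟩ := PySem.List.mem_pyRange_one.mp hdx
    have hm5 : min dy 5 ≤ 5 := by omega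
    exact (hchar (cx + dx) (cy + dy) (by omega) (by omega) (by omega) (by omega)).mpr
      (hp dy h1 h2 dx h3 h4)

theorem fct_grid0_len (width height : Int) (hh : 0 ≤ height) :
    ((((PySem.List.pyRange 0 height).map (fun _ => List.replicate width.toNat '.')).length : Nat) : Int) = height := by
  rw [List.length_map, PySem.List.length_pyRange_one]
  omega

theorem fct_grid0_row (width height : Int) (hw : 0 ≤ width) :
    ∀ r ∈ ((PySem.List.pyRange 0 height).map (fun _ => List.replicate width.toNat '.')), ((r.length : Nat) : Int) = width := by
  intro r hr
  rcases List.mem_map.mp hr with ⟨_, _, he⟩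
  rw [← he, List.length_replicate]
  omega

theorem fct_grid0B_len (width height : Int) (hh : 0 ≤ height) :
    ((((PySem.List.pyRange 0 height).map (fun _ => List.replicate width.toNat false)).length : Nat) : Int) = height := by
  rw [List.length_map, PySem.List.length_pyRange_one]
  omega

theorem fct_grid0B_row (width height : Int) (hw : 0 ≤ width) :
    ∀ r ∈ ((PySem.List.pyRange 0 height).map (fun _ => List.replicate width.toNat false)), ((r.length : Nat) : Int) = width := by
  intro r hr
  rcases List.mem_map.mp hr with ⟨_, _, he⟩
  rw [← he, List.length_replicate]
  omega

-- ===== VERDICT (by name: the statement is the Claim_ definition above) =====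
theorem find_christmas_tree_spec : Claim_equal_find_christmas_tree := by
  intro positions width height _ hpre
  unfold Spec_find_christmas_tree
  obtain ⟨hd, hwr⟩ := hpre
  by_cases hemp : positions = []
  · subst hemp
    have hB : find_christmas_tree_alt [] width height = false := by
      simp [find_christmas_tree_alt]
    have hA : find_christmas_tree [] width height = false := by
      simp only [find_christmas_tree, List.foldl_nil]
      rw [List.any_eq_false]
      intro cy _
      simp only [Bool.not_eq_true, List.any_eq_false]
      intro cx _
      unfold fctCenterOK
      rw [if_pos (by rw [fct_cell_grid0]; decide)]
    rw [hA, hB]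
  · obtain ⟨hw, hh⟩ := hd.resolve_left hemp
    have hchar : ∀ x y, 0 ≤ x → x < width → 0 ≤ y → y < height →
        (fctCell (positions.foldl fctMark
          ((PySem.List.pyRange 0 height).map (fun _ => List.replicate width.toNat '.'))) y x = '#'
          ↔ fctOcc positions width height x y) := by
      intro x y hx0 hx1 hy0 hy1
      rw [fct_fold_char width height hw hh positions _
        (fct_grid0_len width height (by omega)) (fct_grid0_row width height (by omega))
        hwr x y hx0 hx1 hy0 hy1, fct_cell_grid0 width height y x]
      simp
    have hcharB : ∀ x y, 0 ≤ x → x < width → 0 ≤ y → y < height →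
        (fctCellB (positions.foldl fctMarkB
          ((PySem.List.pyRange 0 height).map (fun _ => List.replicate width.toNat false))) y x = true
          ↔ fctOcc positions width height x y) := by
      intro x y hx0 hx1 hy0 hy1
      rw [fct_foldB width height hw hh positions _
        (fct_grid0B_len width height (by omega)) (fct_grid0B_row width height (by omega))
        hwr x y hx0 hx1 hy0 hy1, fct_cellB_grid0 width height y x]
      simp
    have hA : find_christmas_tree positions width height = true ↔
        ∃ cy, (10 ≤ cy ∧ cy < height - 20) ∧ ∃ cx, (10 ≤ cx ∧ cx < width - 20) ∧
          fctTriProp positions width height cx cy := by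
      simp only [find_christmas_tree, List.any_eq_true, PySem.List.mem_pyRange_one]
      constructor
      · rintro ⟨cy, hcy, cx, hcx, hc⟩
        exact ⟨cy, hcy, cx, hcx,
          (fct_center_iff _ positions width height cy cx hchar hcy.1 hcy.2 hcx.1 hcx.2).mp hc⟩
      · rintro ⟨cy, hcy, cx, hcx, hp⟩
        exact ⟨cy, hcy, cx, hcx,
          (fct_center_iff _ positions width height cy cx hchar hcy.1 hcy.2 hcx.1 hcx.2).mpr hp⟩
    have hB : find_christmas_tree_alt positions width height = true ↔
        ∃ p ∈ positions,
          (10 ≤ PySem.Int.mod p.1 width ∧ PySem.Int.mod p.1 width < width - 20 ∧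
           10 ≤ PySem.Int.mod p.2 height ∧ PySem.Int.mod p.2 height < height - 20) ∧
          fctTriProp positions width height (PySem.Int.mod p.1 width) (PySem.Int.mod p.2 height) := by
      simp only [find_christmas_tree_alt, List.any_eq_true, Bool.and_eq_true, decide_eq_true_eq]
      constructor
      · rintro ⟨p, hm, ⟨⟨⟨b1, b2⟩, b3⟩, b4⟩, ht⟩
        exact ⟨p, hm, ⟨b1, b2, b3, b4⟩,
          (fct_triB_iff _ positions width height _ _ hcharB b3 b4 b1 b2).mp ht⟩
      · rintro ⟨p, hm, ⟨b1, b2, b3, b4⟩, hp⟩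
        exact ⟨p, hm, ⟨⟨⟨b1, b2⟩, b3⟩, b4⟩,
          (fct_triB_iff _ positions width height _ _ hcharB b3 b4 b1 b2).mpr hp⟩
    have hbridge : (∃ cy, (10 ≤ cy ∧ cy < height - 20) ∧ ∃ cx, (10 ≤ cx ∧ cx < width - 20) ∧
          fctTriProp positions width height cx cy) ↔
        (∃ p ∈ positions,
          (10 ≤ PySem.Int.mod p.1 width ∧ PySem.Int.mod p.1 width < width - 20 ∧
           10 ≤ PySem.Int.mod p.2 height ∧ PySem.Int.mod p.2 height < height - 20) ∧
          fctTriProp positions width height (PySem.Int.mod p.1 width) (PySem.Int.mod p.2 height)) := by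
      constructor
      · rintro ⟨cy, hcy, cx, hcx, hp⟩
        have hocc := hp 0 (by omega) (by omega) 0 (by simp) (by simp)
        rw [add_zero, add_zero] at hocc
        obtain ⟨p, hpm, he1, he2⟩ := hocc
        refine ⟨p, hpm, ?_, ?_⟩
        · rw [he1, he2]; exact ⟨hcx.1, hcx.2, hcy.1, hcy.2⟩
        · rw [he1, he2]; exact hp
      · rintro ⟨p, _, ⟨b1, b2, b3, b4⟩, hp⟩
        exact ⟨PySem.Int.mod p.2 height, ⟨b3, b4⟩, PySem.Int.mod p.1 width, ⟨b1, b2⟩, hp⟩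
    exact Bool.coe_iff_coe.mp (hA.trans (hbridge.trans hB.symm))
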